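-- pv_equiv track=rewrite | github.com/waveWhirlVfx/HoudiniMind | src/houdinimind/rag/kb_builder.py | _split_prompt_and_code
-- ===== SOURCE A (Python) =====
-- def _split_prompt_and_code(messages: list) -> tuple[str, str]:
--     user_prompt = ""
--     code_text = ""
--     if not isinstance(messages, list):
--         return user_prompt, code_text
--
--     for message in messages:
--         if not isinstance(message, dict):
--             continue
--         role = str(message.get("role") or "").strip().lower()
--         content = str(message.get("content") or "").strip()
--         if not content:
--             continue
--         if role == "user" and not user_prompt:
--             user_prompt = content
--         elif role in {"model", "assistant"} and not code_text:
--             code_text = content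
--
--     if not code_text and messages:
--         for message in messages:
--             if not isinstance(message, dict):
--                 continue
--             content = str(message.get("content") or "").strip()
--             if content:
--                 code_text = content
--                 break
--
--     return user_prompt, code_text
-- ===== SOURCE B (Python) =====
-- def _split_prompt_and_code(messages: list) -> tuple[str, str]:
--     if not isinstance(messages, list):
--         return "", ""
--     user_prompt = code_text = any_text = ""
--     # Single backward scan with unconditional overwrite: the last assignment in
--     # reverse order is the first match in the original order.
--     for m in reversed(messages):
--         if not isinstance(m, dict):
--             continue
--         content = str(m.get("content") or "").strip()
--         if not content:
--             continue
--         any_text = content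
--         role = str(m.get("role") or "").strip().lower()
--         if role == "user":
--             user_prompt = content
--         elif role in ("model", "assistant"):
--             code_text = content
--     return user_prompt, code_text or any_text
-- ===== Notes on version B (the rewrite author's own statement) =====
-- stated objective: alternative
-- what changed: Replaces A's forward loop with first-write guards plus a second explicit fallback loop by ONE backward scan that unconditionally overwrites user/code/any slots (last write in reverse order = first match forward), so the fallback needs no extra pass.
import Mathlib
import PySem

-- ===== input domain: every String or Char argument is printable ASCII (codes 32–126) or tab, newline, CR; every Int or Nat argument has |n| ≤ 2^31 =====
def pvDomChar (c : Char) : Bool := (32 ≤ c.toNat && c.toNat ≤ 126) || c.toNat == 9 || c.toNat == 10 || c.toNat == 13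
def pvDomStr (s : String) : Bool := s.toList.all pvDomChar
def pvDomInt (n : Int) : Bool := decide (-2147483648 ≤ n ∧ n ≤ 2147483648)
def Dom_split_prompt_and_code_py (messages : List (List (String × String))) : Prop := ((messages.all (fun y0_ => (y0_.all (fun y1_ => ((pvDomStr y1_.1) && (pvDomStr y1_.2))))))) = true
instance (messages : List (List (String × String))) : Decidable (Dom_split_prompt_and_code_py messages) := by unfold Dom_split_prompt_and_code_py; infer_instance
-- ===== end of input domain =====

-- B replaces A's forward first-write loop plus separate fallback loop by a single
-- backward scan with unconditional overwrite (alternative decomposition, same cost).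


-- shared normalization helpers (both Pythons compute str(m.get(k) or "").strip()[.lower()])
def pvGetS (m : List (String × String)) (k : String) : String :=
  (PySem.Dict.ofList m).getD k ""

def pvRole (m : List (String × String)) : String :=
  PySem.Str.lower (PySem.Str.strip (pvGetS m "role"))

def pvContent (m : List (String × String)) : String :=
  PySem.Str.strip (pvGetS m "content")

-- ===== PORT A =====
-- one forward pass with first-write guards, then a second fallback loop with break
def pvStepA (st : String × String) (m : List (String × String)) : String × String :=
  let role := pvRole m
  let content := pvContent m
  if content = "" then st
  else if role = "user" ∧ st.1 = "" then (content, st.2)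
  else if (role = "model" ∨ role = "assistant") ∧ st.2 = "" then (st.1, content)
  else st

def pvFallbackA : List (List (String × String)) → String
  | [] => ""
  | m :: rest =>
      let content := pvContent m
      if content ≠ "" then content else pvFallbackA rest

def split_prompt_and_code_py (messages : List (List (String × String))) : String × String :=
  let st := messages.foldl pvStepA ("", "")
  let code := if st.2 = "" ∧ messages ≠ [] then pvFallbackA messages else st.2
  (st.1, code)

-- ===== PORT B =====
-- one backward scan with unconditional overwrite of (user, code, any); code or any at the end
def pvStepB (st : String × String × String) (m : List (String × String)) : String × String × String :=
  let content := pvContent m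
  if content = "" then st
  else
    let role := pvRole m
    if role = "user" then (content, st.2.1, content)
    else if role = "model" ∨ role = "assistant" then (st.1, content, content)
    else (st.1, st.2.1, content)

def split_prompt_and_code_py_alt (messages : List (List (String × String))) : String × String :=
  let st := messages.reverse.foldl pvStepB ("", "", "")
  (st.1, if st.2.1 = "" then st.2.2 else st.2.1)

-- ===== PRECONDITION & SPEC =====
def Spec_split_prompt_and_code_py (messages : List (List (String × String))) (out : String × String) : Prop := out = split_prompt_and_code_py_alt messages
instance (messages : List (List (String × String))) (out : String × String) : Decidable (Spec_split_prompt_and_code_py messages out) := by unfold Spec_split_prompt_and_code_py; infer_instance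

-- ===== CLAIM (what is proved, stated in full; the proofs are below) =====
def Claim_equal_split_prompt_and_code_py : Prop := ∀ (messages : List (List (String × String))), Dom_split_prompt_and_code_py messages → Spec_split_prompt_and_code_py messages (split_prompt_and_code_py messages)

-- ===== LEMMAS AND PROOFS =====

-- the three first-match values, the common language both loops are reduced to
def pvFindUser : List (List (String × String)) → String
  | [] => ""
  | m :: rest =>
      if pvContent m ≠ "" ∧ pvRole m = "user" then pvContent m else pvFindUser rest

def pvFindCode : List (List (String × String)) → String
  | [] => ""
  | m :: rest =>
      if pvContent m ≠ "" ∧ (pvRole m = "model" ∨ pvRole m = "assistant")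
      then pvContent m else pvFindCode rest

def pvFindAny : List (List (String × String)) → String
  | [] => ""
  | m :: rest => if pvContent m ≠ "" then pvContent m else pvFindAny rest

-- A's fused loop computes, per slot, the first match if the slot is still empty
lemma foldA_char (msgs : List (List (String × String))) :
    ∀ u c : String, msgs.foldl pvStepA (u, c) =
      ((if u = "" then pvFindUser msgs else u), (if c = "" then pvFindCode msgs else c)) := by
  induction msgs with
  | nil => intro u c; simp [pvFindUser, pvFindCode]
  | cons m rest ih =>
    intro u c
    simp only [List.foldl_cons]
    by_cases hcon : pvContent m = ""
    · have h1 : pvStepA (u, c) m = (u, c) := by simp [pvStepA, hcon]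
      rw [h1, ih u c]
      simp [pvFindUser, pvFindCode, hcon]
    · by_cases hrole : pvRole m = "user"
      · have hnc : ¬ (pvRole m = "model" ∨ pvRole m = "assistant") := by
          rw [hrole]; rintro (h | h) <;> simp_all
        by_cases hu : u = ""
        · have h1 : pvStepA (u, c) m = (pvContent m, c) := by
            simp [pvStepA, hcon, hrole, hu]
          rw [h1, ih (pvContent m) c]
          simp [pvFindUser, pvFindCode, hcon, hrole, hu]
        · have h1 : pvStepA (u, c) m = (u, c) := by
            simp [pvStepA, hcon, hrole, hu]
          rw [h1, ih u c]
          simp [pvFindCode, hnc, hcon, hu]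
      · by_cases hmc : pvRole m = "model" ∨ pvRole m = "assistant"
        · by_cases hc : c = ""
          · have h1 : pvStepA (u, c) m = (u, pvContent m) := by
              simp [pvStepA, hcon, hrole, hmc, hc]
            rw [h1, ih u (pvContent m)]
            simp [pvFindUser, pvFindCode, hcon, hrole, hmc, hc]
          · have h1 : pvStepA (u, c) m = (u, c) := by
              simp [pvStepA, hcon, hrole, hc]
            rw [h1, ih u c]
            simp [pvFindUser, hcon, hrole, hc]
        · have h1 : pvStepA (u, c) m = (u, c) := by
            simp [pvStepA, hcon, hrole, hmc]
          rw [h1, ih u c]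
          simp [pvFindUser, pvFindCode, hcon, hrole, hmc]

-- A's fallback loop is the first non-empty content
lemma fallbackA_char (msgs : List (List (String × String))) :
    pvFallbackA msgs = pvFindAny msgs := by
  induction msgs with
  | nil => simp [pvFallbackA, pvFindAny]
  | cons m rest ih => by_cases hcon : pvContent m = "" <;> simp [pvFallbackA, pvFindAny, hcon, ih]

-- B's backward overwrite scan also yields the three first matches:
-- folding the reversed list is a foldr, where the head overwrites the tail's result
lemma foldB_char (msgs : List (List (String × String))) :
    msgs.reverse.foldl pvStepB ("", "", "") =
      (pvFindUser msgs, pvFindCode msgs, pvFindAny msgs) := by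
  rw [List.foldl_reverse]
  induction msgs with
  | nil => simp [pvFindUser, pvFindCode, pvFindAny]
  | cons m rest ih =>
    simp only [List.foldr_cons, ih]
    by_cases hcon : pvContent m = ""
    · simp [pvStepB, pvFindUser, pvFindCode, pvFindAny, hcon]
    · by_cases hrole : pvRole m = "user"
      · simp [pvStepB, pvFindUser, pvFindCode, pvFindAny, hcon, hrole]
      · by_cases hmc : pvRole m = "model" ∨ pvRole m = "assistant"
        · simp [pvStepB, pvFindUser, pvFindCode, pvFindAny, hcon, hrole, hmc]
        · simp [pvStepB, pvFindUser, pvFindCode, pvFindAny, hcon, hrole, hmc]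

-- ===== VERDICT (by name: the statement is the Claim_ definition above) =====
theorem split_prompt_and_code_py_spec : Claim_equal_split_prompt_and_code_py := by
  intro messages _
  show split_prompt_and_code_py messages = split_prompt_and_code_py_alt messages
  unfold split_prompt_and_code_py split_prompt_and_code_py_alt
  rw [foldA_char messages "" "", fallbackA_char, foldB_char]
  show (pvFindUser messages,
        if pvFindCode messages = "" ∧ messages ≠ [] then pvFindAny messages else pvFindCode messages)
      = (pvFindUser messages,
        if pvFindCode messages = "" then pvFindAny messages else pvFindCode messages)
  by_cases hc : pvFindCode messages = ""
  · by_cases hm : messages = []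
    · subst hm; simp [pvFindCode, pvFindAny]
    · simp [hc, hm]
  · simp [hc]
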